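-- pv_equiv track=rewrite | github.com/felixthebeard/gbm_transient_search | gbm_bkg_pipe/utils/saa_calc.py | slice_disjoint_idx
-- ===== SOURCE A (Python) =====
-- def slice_disjoint_idx(arr):
--     """
--     Returns an array of disjoint indices from a bool array
--     :param arr: and array of bools
--     """
--
--     slices = []
--     start_slice = arr[0]
--     counter = 0
--     for i in range(len(arr) - 1):
--         if arr[i + 1] > arr[i] + 1:
--             end_slice = arr[i]
--             slices.append([start_slice, end_slice])
--             start_slice = arr[i + 1]
--             counter += 1
--     if counter == 0:
--         return [[arr[0], arr[-1]]]
--     if end_slice != arr[-1]: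
--         slices.append([start_slice, arr[-1]])
--     return slices
-- ===== SOURCE B (Python) =====
-- def slice_disjoint_idx(arr):
--     # Two-phase: detect gap positions first, then assemble slices from boundary lists.
--     gaps = [i for i in range(len(arr) - 1) if arr[i + 1] > arr[i] + 1]
--     if not gaps:
--         return [[arr[0], arr[-1]]]
--     starts = [arr[0]] + [arr[g + 1] for g in gaps]
--     ends = [arr[g] for g in gaps]
--     slices = [[s, e] for s, e in zip(starts, ends)]
--     if arr[gaps[-1]] != arr[-1]:
--         slices.append([starts[-1], arr[-1]])
--     return slices
-- ===== Notes on version B (the rewrite author's own statement) =====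
-- stated objective: alternative
-- what changed: Replaces A's single stateful loop (mutable start_slice/end_slice/counter) with a two-phase decomposition: one pass collecting gap indices, then slice construction by zipping boundary lists derived from those gaps.
import Mathlib
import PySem

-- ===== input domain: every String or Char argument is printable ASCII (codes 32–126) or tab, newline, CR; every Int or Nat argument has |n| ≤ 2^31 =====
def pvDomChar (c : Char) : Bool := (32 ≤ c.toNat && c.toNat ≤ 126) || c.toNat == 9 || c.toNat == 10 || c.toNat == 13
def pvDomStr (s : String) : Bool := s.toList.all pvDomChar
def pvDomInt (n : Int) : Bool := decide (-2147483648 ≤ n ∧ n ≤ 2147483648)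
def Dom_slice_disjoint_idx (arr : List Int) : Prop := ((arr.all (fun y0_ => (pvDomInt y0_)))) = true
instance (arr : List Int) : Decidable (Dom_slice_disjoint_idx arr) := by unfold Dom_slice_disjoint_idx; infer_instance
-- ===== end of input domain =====

-- B replaces A's single stateful loop by a two-phase decomposition (gap detection, then
-- slice assembly from boundary lists); same values, same cost.
-- Indexing note: every element access in both Pythons is in range whenever
-- arr ≠ [] (Pre_); we port them with List.getD/getLastD, which are exact on in-range indices.

-- ===== PORT A =====
-- state: (slices, start_slice, end_slice, counter); end_slice is unbound in Python until the
-- first gap — initialized 0 here, unused when counter = 0 (the early return fires first).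
def slice_disjoint_idx (arr : List Int) : List (List Int) :=
  let st := (List.range (arr.length - 1)).foldl
    (fun s i =>
      if arr.getD (i+1) 0 > arr.getD i 0 + 1 then
        (s.1 ++ [[s.2.1, arr.getD i 0]], arr.getD (i+1) 0, arr.getD i 0, s.2.2.2 + 1)
      else s)
    ([], arr.getD 0 0, 0, 0)
  if st.2.2.2 = 0 then [[arr.getD 0 0, arr.getLastD 0]]
  else if st.2.2.1 ≠ arr.getLastD 0 then st.1 ++ [[st.2.1, arr.getLastD 0]]
  else st.1

-- ===== PORT B =====
def slice_disjoint_idx_alt (arr : List Int) : List (List Int) :=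
  let gaps := (List.range (arr.length - 1)).filter (fun i => arr.getD (i+1) 0 > arr.getD i 0 + 1)
  if gaps = [] then [[arr.getD 0 0, arr.getLastD 0]]
  else
    let starts := arr.getD 0 0 :: gaps.map (fun g => arr.getD (g+1) 0)
    let ends := gaps.map (fun g => arr.getD g 0)
    let slices := List.zipWith (fun s e => [s, e]) starts ends
    if arr.getD (gaps.getLastD 0) 0 ≠ arr.getLastD 0 then
      slices ++ [[starts.getLastD 0, arr.getLastD 0]]
    else slices

-- ===== PRECONDITION & SPEC =====
-- Pre_ excludes only the empty list, on which A raises IndexError at its first element access.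
def Pre_slice_disjoint_idx (arr : List Int) : Prop := arr ≠ []
instance (arr : List Int) : Decidable (Pre_slice_disjoint_idx arr) := by unfold Pre_slice_disjoint_idx; infer_instance
def pvWitness_slice_disjoint_idx : List Int := [1, 2, 5, 6]

def Spec_slice_disjoint_idx (arr : List Int) (out : List (List Int)) : Prop := out = slice_disjoint_idx_alt arr
instance (arr : List Int) (out : List (List Int)) : Decidable (Spec_slice_disjoint_idx arr out) := by unfold Spec_slice_disjoint_idx; infer_instance

-- ===== CLAIM (what is proved, stated in full; the proofs are below) =====
def Claim_equal_slice_disjoint_idx : Prop := ∀ (arr : List Int), Dom_slice_disjoint_idx arr → Pre_slice_disjoint_idx arr → Spec_slice_disjoint_idx arr (slice_disjoint_idx arr)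

-- ===== LEMMAS AND PROOFS =====

-- A's loop step, with (pvAstep) and without (pvGstep) the gap test.
def pvGstep (arr : List Int) (s : List (List Int) × Int × Int × Nat) (i : Nat) :
    List (List Int) × Int × Int × Nat :=
  (s.1 ++ [[s.2.1, arr.getD i 0]], arr.getD (i+1) 0, arr.getD i 0, s.2.2.2 + 1)

-- folding the guarded step over l = folding the unguarded step over the gap positions of l
theorem pvFoldFilter (arr : List Int) :
    ∀ (l : List Nat) (s : List (List Int) × Int × Int × Nat),
      l.foldl (fun s i =>
          if arr.getD (i+1) 0 > arr.getD i 0 + 1 then pvGstep arr s i else s) s =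
        (l.filter (fun i => arr.getD (i+1) 0 > arr.getD i 0 + 1)).foldl (pvGstep arr) s := by
  intro l
  induction l with
  | nil => intro s; rfl
  | cons i t ih =>
    intro s
    rw [List.foldl_cons, List.filter_cons]
    by_cases h : arr.getD (i+1) 0 > arr.getD i 0 + 1
    · rw [if_pos h, if_pos (by simpa using h), List.foldl_cons, ih]
    · rw [if_neg h, if_neg (by simpa using h), ih]

-- closed form of folding the unguarded step over an arbitrary gap list
theorem pvFoldGstep (arr : List Int) :
    ∀ (g : List Nat) (sl : List (List Int)) (st en : Int) (c : Nat),
      g.foldl (pvGstep arr) (sl, st, en, c) =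
        (sl ++ List.zipWith (fun s e => [s, e])
                 (st :: g.map (fun i => arr.getD (i+1) 0)) (g.map (fun i => arr.getD i 0)),
         (st :: g.map (fun i => arr.getD (i+1) 0)).getLastD 0,
         (en :: g.map (fun i => arr.getD i 0)).getLastD 0,
         c + g.length) := by
  intro g
  induction g with
  | nil => intro sl st en c; simp
  | cons i t ih =>
    intro sl st en c
    rw [List.foldl_cons]
    show List.foldl (pvGstep arr) (sl ++ [[st, arr.getD i 0]], arr.getD (i+1) 0, arr.getD i 0, c + 1) t = _
    rw [ih]
    simp only [List.map_cons, List.zipWith_cons_cons, List.getLastD_cons, List.length_cons,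
      Prod.mk.injEq]
    refine ⟨by simp, ?_, ?_, by omega⟩
    · cases t <;> simp
    · cases t <;> simp

theorem pvGetLastD_map (f : Nat → Int) :
    ∀ (l : List Nat), l ≠ [] → (l.map f).getLastD 0 = f (l.getLastD 0) := by
  intro l
  induction l with
  | nil => intro h; exact absurd rfl h
  | cons a t ih =>
    intro _
    cases t with
    | nil => simp
    | cons b u => simpa using ih (by simp)

-- ===== VERDICT (by name: the statement is the Claim_ definition above) =====
theorem slice_disjoint_idx_spec : Claim_equal_slice_disjoint_idx := by
  intro arr _ _
  unfold Spec_slice_disjoint_idx slice_disjoint_idx slice_disjoint_idx_alt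
  have hfold := pvFoldFilter arr (List.range (arr.length - 1)) ([], arr.getD 0 0, 0, 0)
  simp only [pvGstep] at hfold
  simp only [hfold, pvFoldGstep arr]
  set gaps := (List.range (arr.length - 1)).filter
      (fun i => decide (arr.getD (i+1) 0 > arr.getD i 0 + 1)) with hg
  by_cases hnil : gaps = []
  · simp [hnil]
  · have hlen : gaps.length ≠ 0 := by simpa [List.length_eq_zero_iff] using hnil
    have hen : ((0 : Int) :: gaps.map (fun i => arr.getD i 0)).getLastD 0
        = arr.getD (gaps.getLastD 0) 0 := by
      rw [List.getLastD_cons]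
      exact pvGetLastD_map _ gaps hnil
    simp only [List.getLastD_eq_getLast?, List.getD_eq_getElem?_getD] at hen
    simp [hnil, hlen, hen]
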